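-- pv_equiv track=rewrite | github.com/hassanabdulqayyum/streamlit-ebook-reader | read.py | get_display_content
-- ===== SOURCE A (Python) =====
-- def get_display_content(paragraph_index, content_units):
--     """
--     Given the current paragraph index, return the content units to display.
--     Includes the headings associated with each paragraph, and ensures three paragraphs are displayed.
--     """
--     # Build a list of indices of paragraphs
--     paragraph_indices = [i for i, cu in enumerate(content_units) if cu['type'] == 'paragraph']
--
--     num_paragraphs = len(paragraph_indices)
--
--     # Handle the case where no paragraphs are found
--     if num_paragraphs == 0:
--         return [], paragraph_index
--
--     # Ensure paragraph_index is within bounds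
--     if paragraph_index < 0:
--         paragraph_index = 0
--     elif paragraph_index >= num_paragraphs:
--         paragraph_index = num_paragraphs - 1
--
--     # Get indices for the three paragraphs
--     indices_to_show = []
--     for offset in [-1, 0, 1]:
--         para_idx = paragraph_index + offset
--         if 0 <= para_idx < num_paragraphs:
--             indices_to_show.append(para_idx)
--
--     display_units = []
--     for para_idx in indices_to_show:
--         paragraph_pos = paragraph_indices[para_idx]
--
--         # Collect any headings immediately preceding the paragraph
--         idx = paragraph_pos - 1
--         # Collect headings in reverse order until we hit a non-heading element
--         headings = []
--         while idx >= 0 and content_units[idx]['type'] in ['heading', 'image', 'caption', 'spacer']: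
--             if content_units[idx]['type'] == 'heading':
--                 headings.insert(0, content_units[idx])  # Insert at the beginning
--             idx -= 1
--
--         # Add headings to display units
--         display_units.extend(headings)
--
--         # Add the paragraph
--         display_units.append(content_units[paragraph_pos])
--
--         # Collect any non-paragraph content units immediately after the paragraph
--         idx = paragraph_pos + 1
--         while idx < len(content_units) and content_units[idx]['type'] not in ['paragraph', 'heading']:
--             if content_units[idx]['type'] != 'spacer':
--                 display_units.append(content_units[idx])
--             idx += 1
--
--     return display_units, paragraph_index
-- ===== SOURCE B (Python) =====
-- def get_display_content(paragraph_index, content_units):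
--     # One forward pass: build, per paragraph, its display group
--     # (leading headings + paragraph + trailing non-spacer content), then
--     # clamp the index and concatenate the in-range window of three groups.
--     groups = []        # completed/open display groups, one per paragraph seen
--     buffer = []        # headings of the current heading/image/caption/spacer run
--     open_ = False      # whether the last group still accepts trailing content
--     for cu in content_units:
--         t = cu['type']
--         if t == 'paragraph':
--             groups.append(buffer + [cu])
--             buffer = []
--             open_ = True
--         elif t == 'heading':
--             open_ = False
--             buffer.append(cu)
--         else:
--             if open_ and t != 'spacer':
--                 groups[-1].append(cu)
--             if t not in ('image', 'caption', 'spacer'):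
--                 buffer = []
--     n = len(groups)
--     if n == 0:
--         return [], paragraph_index
--     pi = 0 if paragraph_index < 0 else (n - 1 if paragraph_index >= n else paragraph_index)
--     out = []
--     for j in range(max(pi - 1, 0), min(pi + 1, n - 1) + 1):
--         out.extend(groups[j])
--     return out, pi
-- ===== Notes on version B (the rewrite author's own statement) =====
-- stated objective: alternative
-- what changed: B replaces A's per-window backward/forward index scans (three re-scans with headings.insert(0,...)) by a single forward pass that builds one display group per paragraph (leading headings via a run buffer, trailing content appended to the open group), then clamps the index and concatenates the in-range window of groups.
import Mathlib
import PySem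

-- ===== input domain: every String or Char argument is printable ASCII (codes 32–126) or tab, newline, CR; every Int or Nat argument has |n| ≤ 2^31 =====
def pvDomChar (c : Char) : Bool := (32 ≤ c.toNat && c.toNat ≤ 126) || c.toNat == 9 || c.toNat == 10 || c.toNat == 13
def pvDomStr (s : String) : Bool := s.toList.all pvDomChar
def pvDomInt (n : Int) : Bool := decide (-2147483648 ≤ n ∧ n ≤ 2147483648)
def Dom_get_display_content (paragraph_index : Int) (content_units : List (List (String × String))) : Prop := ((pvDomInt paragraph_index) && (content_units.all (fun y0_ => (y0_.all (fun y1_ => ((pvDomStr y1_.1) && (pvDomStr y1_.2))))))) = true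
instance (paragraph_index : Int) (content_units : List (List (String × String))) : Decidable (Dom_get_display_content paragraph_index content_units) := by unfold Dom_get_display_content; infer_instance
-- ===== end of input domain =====

-- B rebuilds the result in ONE forward pass (a per-paragraph group table, then a clamped
-- window concatenation) instead of A's three backward/forward index scans; objective: alternative.

abbrev pvCU := List (String × String)

-- ===== PORT A =====

-- cu['type'] : first-match lookup in the association list; exact whenever cu has a "type" key (Pre_ guarantees it)
def pvTyA (cu : pvCU) : String := ((cu.find? (fun kv => kv.1 == "type")).map (·.2)).getD ""

-- the backward 'while idx >= 0 and … in [heading,image,caption,spacer]' loop (headings.insert(0,·) = cons)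
def pvBackA (cus : List pvCU) (idx : Int) (heads : List pvCU) : List pvCU :=
  if _h : 0 ≤ idx then
    match PySem.List.pyGet? cus idx with
    | some cu =>
      if pvTyA cu = "heading" ∨ pvTyA cu = "image" ∨ pvTyA cu = "caption" ∨ pvTyA cu = "spacer" then
        pvBackA cus (idx - 1) (if pvTyA cu = "heading" then cu :: heads else heads)
      else heads
    | none => heads   -- unreachable: the loop only reads indices < len(content_units)
  else heads
termination_by (idx + 1).toNat
decreasing_by omega

-- the forward 'while idx < len(content_units) and … not in [paragraph,heading]' loop
def pvFwdA (cus : List pvCU) (idx : Int) (du : List pvCU) : List pvCU :=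
  if _h : idx < (cus.length : Int) then
    match PySem.List.pyGet? cus idx with
    | some cu =>
      if ¬ (pvTyA cu = "paragraph" ∨ pvTyA cu = "heading") then
        pvFwdA cus (idx + 1) (if pvTyA cu ≠ "spacer" then du ++ [cu] else du)
      else du
    | none => du   -- unreachable: 0 ≤ idx on every call
  else du
termination_by ((cus.length : Int) - idx).toNat
decreasing_by omega

def get_display_content (paragraph_index : Int) (content_units : List (List (String × String))) : (List (List (String × String))) × Int :=
  let paragraph_indices : List Int :=
    ((PySem.List.enumerate content_units).filter (fun ic => pvTyA ic.2 = "paragraph")).map (·.1)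
  let num_paragraphs : Int := (paragraph_indices.length : Int)
  if num_paragraphs = 0 then ([], paragraph_index)
  else
    let pi : Int :=
      if paragraph_index < 0 then 0
      else if paragraph_index ≥ num_paragraphs then num_paragraphs - 1
      else paragraph_index
    let indices_to_show : List Int :=
      [(-1 : Int), 0, 1].foldl (fun acc off =>
        if 0 ≤ pi + off ∧ pi + off < num_paragraphs then acc ++ [pi + off] else acc) []
    let display_units : List pvCU :=
      indices_to_show.foldl (fun du pa =>
        let pos := PySem.List.pyGetD paragraph_indices pa 0
        let du := du ++ pvBackA content_units (pos - 1) []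
        let du := du ++ [PySem.List.pyGetD content_units pos []]
        pvFwdA content_units (pos + 1) du) []
    (display_units, pi)

-- ===== PORT B =====

def pvTyB (cu : pvCU) : String := ((cu.find? (fun kv => kv.1 == "type")).map (·.2)).getD ""

-- one step of B's single forward pass; state = (groups, open_, buffer)
def pvStepB (st : List (List pvCU) × Bool × List pvCU) (cu : pvCU) : List (List pvCU) × Bool × List pvCU :=
  let t := pvTyB cu
  if t = "paragraph" then (st.1 ++ [st.2.2 ++ [cu]], true, [])
  else if t = "heading" then (st.1, false, st.2.2 ++ [cu])
  else
    let groups := if st.2.1 ∧ t ≠ "spacer" then st.1.dropLast ++ [st.1.getLastD [] ++ [cu]] else st.1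
    let buffer := if t = "image" ∨ t = "caption" ∨ t = "spacer" then st.2.2 else []
    (groups, st.2.1, buffer)

def get_display_content_alt (paragraph_index : Int) (content_units : List (List (String × String))) : (List (List (String × String))) × Int :=
  let groups := (content_units.foldl pvStepB ([], false, [])).1
  let n : Int := (groups.length : Int)
  if n = 0 then ([], paragraph_index)
  else
    let pi : Int :=
      if paragraph_index < 0 then 0
      else if paragraph_index ≥ n then n - 1
      else paragraph_index
    let out : List pvCU :=
      (PySem.List.pyRange (max (pi - 1) 0) (min (pi + 1) (n - 1) + 1) 1).foldl
        (fun out j => out ++ PySem.List.pyGetD groups j []) []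
    (out, pi)

-- ===== PRECONDITION & SPEC =====
-- Pre_ excludes exactly the inputs where some content unit lacks a "type" key: there A raises KeyError.
def Pre_get_display_content (paragraph_index : Int) (content_units : List (List (String × String))) : Prop :=
  content_units.all (fun cu => cu.any (fun kv => kv.1 == "type")) = true
instance (paragraph_index : Int) (content_units : List (List (String × String))) : Decidable (Pre_get_display_content paragraph_index content_units) := by unfold Pre_get_display_content; infer_instance

def pvWitness_get_display_content : Int × (List (List (String × String))) :=
  (1, [[("type", "heading"), ("text", "H")], [("type", "paragraph"), ("text", "p0")],
       [("type", "paragraph"), ("text", "p1")], [("type", "image"), ("src", "i")],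
       [("type", "spacer")], [("type", "paragraph"), ("text", "p2")]])

def Spec_get_display_content (paragraph_index : Int) (content_units : List (List (String × String))) (out : (List (List (String × String))) × Int) : Prop := out = get_display_content_alt paragraph_index content_units
instance (paragraph_index : Int) (content_units : List (List (String × String))) (out : (List (List (String × String))) × Int) : Decidable (Spec_get_display_content paragraph_index content_units out) := by unfold Spec_get_display_content; infer_instance

-- ===== CLAIM (what is proved, stated in full; the proofs are below) =====
def Claim_equal_get_display_content : Prop := ∀ (paragraph_index : Int) (content_units : List (List (String × String))), Dom_get_display_content paragraph_index content_units → Pre_get_display_content paragraph_index content_units → Spec_get_display_content paragraph_index content_units (get_display_content paragraph_index content_units)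

-- ===== LEMMAS AND PROOFS =====

-- proof-side vocabulary: per-paragraph heads/trailing groups, paragraph positions, open-trailing flag
def pvRun (cu : pvCU) : Bool :=
  decide (pvTyA cu = "heading" ∨ pvTyA cu = "image" ∨ pvTyA cu = "caption" ∨ pvTyA cu = "spacer")
def pvStop (cu : pvCU) : Bool := decide (pvTyA cu = "paragraph" ∨ pvTyA cu = "heading")
def pvHead (cu : pvCU) : Bool := decide (pvTyA cu = "heading")
def pvNsp (cu : pvCU) : Bool := decide (pvTyA cu ≠ "spacer")

def pvHeads (pre : List pvCU) : List pvCU := ((pre.reverse.takeWhile pvRun).filter pvHead).reverse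
def pvTrail (suf : List pvCU) : List pvCU := (suf.takeWhile (fun cu => !pvStop cu)).filter pvNsp
def pvParaPos (cus : List pvCU) : List Nat :=
  (List.range cus.length).filter (fun i => decide (pvTyA (cus.getD i []) = "paragraph"))
def pvGroup (cus : List pvCU) (p : Nat) : List pvCU :=
  pvHeads (cus.take p) ++ [cus.getD p []] ++ pvTrail (cus.drop (p + 1))
def pvOpen (cus : List pvCU) : Bool :=
  match (pvParaPos cus).getLast? with
  | some p => (cus.drop (p + 1)).all (fun cu => !pvStop cu)
  | none => false

theorem pv_takeWhile_concat {α : Type} (pred : α → Bool) (l : List α) (x : α) :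
    (l ++ [x]).takeWhile pred =
      if l.all pred then l ++ (if pred x then [x] else []) else l.takeWhile pred := by
  induction l with
  | nil => by_cases hx : pred x <;> simp [List.takeWhile, hx]
  | cons a l ih =>
    by_cases ha : pred a
    · by_cases h2 : l.all pred <;> simp [ha, List.all_cons, ih, h2]
    · simp [ha, List.all_cons]

theorem pv_heads_concat (xs : List pvCU) (x : pvCU) :
    pvHeads (xs ++ [x]) =
      if pvRun x then pvHeads xs ++ (if pvHead x then [x] else []) else [] := by
  unfold pvHeads
  rw [List.reverse_append, List.reverse_singleton]
  by_cases hr : pvRun x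
  · by_cases hh : pvHead x <;> simp [hr, hh]
  · simp [hr]

theorem pv_backA_eq (cus : List pvCU) (k : Nat) (hk : k ≤ cus.length) (acc : List pvCU) :
    pvBackA cus ((k : Int) - 1) acc = pvHeads (cus.take k) ++ acc := by
  induction k generalizing acc with
  | zero => rw [pvBackA]; simp [pvHeads]
  | succ k ih =>
    have hklt : k < cus.length := by omega
    rw [pvBackA]
    rw [dif_pos (by omega : (0:Int) ≤ (↑(k+1) : Int) - 1)]
    have hidx : ((↑(k+1) : Int) - 1) = (k : Int) := by push_cast; ring
    rw [hidx, PySem.List.pyGet?_natCast, List.getElem?_eq_getElem hklt]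
    simp only []
    have htake : cus.take (k+1) = cus.take k ++ [cus[k]] := by
      rw [List.take_succ, List.getElem?_eq_getElem hklt]; rfl
    rw [htake, pv_heads_concat]
    by_cases hr : pvTyA cus[k] = "heading" ∨ pvTyA cus[k] = "image" ∨ pvTyA cus[k] = "caption" ∨ pvTyA cus[k] = "spacer"
    · rw [if_pos hr]
      have hr' : pvRun cus[k] = true := by simp [pvRun, hr]
      rw [hr', if_pos rfl]
      have : ((k : Int) - 1) = ((k : Int)) - 1 := rfl
      by_cases hh : pvTyA cus[k] = "heading"
      · have hh' : pvHead cus[k] = true := by simp [pvHead, hh]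
        rw [if_pos hh, hh', if_pos rfl, ih (by omega)]
        simp
      · have hh' : pvHead cus[k] = false := by simp [pvHead, hh]
        rw [if_neg hh, hh']
        simp only [Bool.false_eq_true, if_false, List.append_nil]
        exact ih (by omega) acc
    · rw [if_neg hr]
      have hr' : pvRun cus[k] = false := by simp [pvRun]; tauto
      rw [hr']
      simp
theorem pv_trail_cons (x : pvCU) (l : List pvCU) :
    pvTrail (x :: l) =
      if pvStop x then [] else (if pvNsp x then [x] else []) ++ pvTrail l := by
  by_cases hs : pvStop x
  · simp [pvTrail, hs]
  · by_cases hn : pvNsp x <;> simp [pvTrail, hs, hn]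

theorem pv_fwdA_aux (cus : List pvCU) (m : Nat) :
    ∀ (k : Nat), cus.length ≤ k + m → ∀ (acc : List pvCU),
      pvFwdA cus (k : Int) acc = acc ++ pvTrail (cus.drop k) := by
  induction m with
  | zero =>
    intro k hk acc
    rw [pvFwdA, dif_neg (by exact_mod_cast by omega : ¬ ((k:Int) < (cus.length : Int)))]
    rw [List.drop_of_length_le (by omega)]
    simp [pvTrail]
  | succ m ih =>
    intro k hk acc
    by_cases hklt : k < cus.length
    · rw [pvFwdA, dif_pos (by exact_mod_cast hklt)]
      rw [PySem.List.pyGet?_natCast, List.getElem?_eq_getElem hklt]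
      simp only []
      have hdrop : cus.drop k = cus[k] :: cus.drop (k+1) :=
        List.drop_eq_getElem_cons hklt
      rw [hdrop, pv_trail_cons]
      by_cases hs : pvTyA cus[k] = "paragraph" ∨ pvTyA cus[k] = "heading"
      · rw [if_neg (not_not_intro hs)]
        have hs' : pvStop cus[k] = true := by simp only [pvStop]; exact decide_eq_true hs
        rw [hs', if_pos rfl]
        simp
      · rw [if_pos hs]
        have hs' : pvStop cus[k] = false := by
          simp only [pvStop, decide_eq_false_iff_not]; exact hs
        rw [hs']
        simp only [Bool.false_eq_true, if_false]
        have hcast : (k : Int) + 1 = ((k+1 : Nat) : Int) := by push_cast; ring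
        rw [hcast]
        by_cases hn : pvTyA cus[k] ≠ "spacer"
        · have hn' : pvNsp cus[k] = true := by
            simp only [pvNsp]; exact decide_eq_true hn
          rw [if_pos hn, hn', if_pos rfl, ih (k+1) (by omega)]
          simp
        · have heq : pvTyA cus[k] = "spacer" := by exact not_not.mp hn
          have hn' : pvNsp cus[k] = false := by simp [pvNsp, heq]
          rw [if_neg hn, hn']
          simp only [Bool.false_eq_true, if_false, List.nil_append]
          exact ih (k+1) (by omega) acc
    · rw [pvFwdA, dif_neg (by exact_mod_cast by omega : ¬ ((k:Int) < (cus.length : Int)))]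
      rw [List.drop_of_length_le (by omega)]
      simp [pvTrail]

theorem pv_fwdA_eq (cus : List pvCU) (k : Nat) (acc : List pvCU) :
    pvFwdA cus (k : Int) acc = acc ++ pvTrail (cus.drop k) :=
  pv_fwdA_aux cus cus.length k (by omega) acc



theorem pv_paraPos_cons (x : pvCU) (xs : List pvCU) :
    pvParaPos (x :: xs) =
      (if pvTyA x = "paragraph" then [0] else []) ++ (pvParaPos xs).map (· + 1) := by
  unfold pvParaPos
  rw [List.length_cons, List.range_succ_eq_map, List.filter_cons, List.filter_map]
  by_cases hx : pvTyA x = "paragraph" <;>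
    · simp only [List.getD, List.getElem?_cons_succ, List.getElem?_cons_zero,
        Option.getD_some, hx, decide_true, decide_false, if_true, if_false,
        Bool.false_eq_true, Function.comp_def, List.singleton_append, List.nil_append]
      rfl

theorem pv_paraIdxA_aux (cus : List pvCU) :
    ∀ (s : Int),
      ((PySem.List.enumerate cus s).filter (fun ic => pvTyA ic.2 = "paragraph")).map (·.1)
        = (pvParaPos cus).map (fun n : Nat => s + (n : Int)) := by
  induction cus with
  | nil => intro s; simp [PySem.List.enumerate_nil, pvParaPos]
  | cons x xs ih =>
    intro s
    have hmm : ((pvParaPos xs).map (· + 1)).map (fun n : Nat => s + (n : Int))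
        = (pvParaPos xs).map (fun n : Nat => (s + 1) + (n : Int)) := by
      rw [List.map_map]
      apply List.map_congr_left
      intro a _
      simp only [Function.comp_apply]
      push_cast
      ring
    rw [PySem.List.enumerate_cons, List.filter_cons, pv_paraPos_cons]
    by_cases hx : pvTyA x = "paragraph"
    · rw [if_pos (by simp [hx]), if_pos hx, List.map_cons, ih (s + 1),
        List.singleton_append, List.map_cons, hmm]
      norm_num
    · rw [if_neg (by simp [hx]), if_neg hx, List.nil_append, ih (s + 1)]
      exact hmm.symm

theorem pv_paraIdxA_eq (cus : List pvCU) :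
    ((PySem.List.enumerate cus).filter (fun ic => pvTyA ic.2 = "paragraph")).map (·.1)
      = (pvParaPos cus).map (fun n : Nat => (n : Int)) := by
  rw [pv_paraIdxA_aux cus 0]
  apply List.map_congr_left
  intro a _
  ring
theorem pv_mem_paraPos {xs : List pvCU} {p : Nat} :
    p ∈ pvParaPos xs ↔ p < xs.length ∧ pvTyA (xs.getD p []) = "paragraph" := by
  simp [pvParaPos, List.mem_filter, List.mem_range]

theorem pv_paraPos_concat (xs : List pvCU) (x : pvCU) :
    pvParaPos (xs ++ [x]) = pvParaPos xs ++ (if pvTyA x = "paragraph" then [xs.length] else []) := by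
  unfold pvParaPos
  rw [List.length_append, List.length_singleton, List.range_succ, List.filter_append]
  congr 1
  · apply List.filter_congr
    intro i hi
    rw [List.getD_append _ _ _ _ (by simpa using hi)]
  · by_cases hx : pvTyA x = "paragraph" <;> simp [hx]

theorem pv_takeWhile_self_of_all {l : List pvCU}
    (hall : l.all (fun cu => !pvStop cu) = true) :
    l.takeWhile (fun cu => !pvStop cu) = l := by
  rw [List.takeWhile_eq_self_iff]
  exact List.all_eq_true.mp hall

theorem pv_trail_concat_stop (l : List pvCU) (x : pvCU) (hx : pvStop x = true) :
    pvTrail (l ++ [x]) = pvTrail l := by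
  unfold pvTrail
  rw [pv_takeWhile_concat]
  by_cases hall : l.all (fun cu => !pvStop cu)
  · rw [if_pos hall, hx, pv_takeWhile_self_of_all hall]
    simp
  · rw [if_neg hall]

theorem pv_trail_concat_nonstop (l : List pvCU) (x : pvCU) (hx : pvStop x = false)
    (hall : l.all (fun cu => !pvStop cu) = true) :
    pvTrail (l ++ [x]) = pvTrail l ++ (if pvNsp x then [x] else []) := by
  unfold pvTrail
  rw [pv_takeWhile_concat, if_pos hall, hx, pv_takeWhile_self_of_all hall,
    List.filter_append]
  by_cases hn : pvNsp x <;> simp [hn, pv_takeWhile_self_of_all hall]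

theorem pv_trail_concat_notall (l : List pvCU) (x : pvCU)
    (h : l.all (fun cu => !pvStop cu) = false) :
    pvTrail (l ++ [x]) = pvTrail l := by
  unfold pvTrail
  rw [pv_takeWhile_concat, if_neg (by simp [h])]

theorem pv_paraPos_pairwise (xs : List pvCU) : (pvParaPos xs).Pairwise (· < ·) :=
  List.Pairwise.sublist List.filter_sublist List.pairwise_lt_range

theorem pv_all_false_of_between {xs : List pvCU} {p q : Nat}
    (hq : q ∈ pvParaPos xs) (hlt : p < q) :
    (xs.drop (p + 1)).all (fun cu => !pvStop cu) = false := by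
  obtain ⟨hqlen, hqty⟩ := pv_mem_paraPos.mp hq
  have hmem : xs[q] ∈ xs.drop (p + 1) := by
    have h2 : (xs.drop (p+1))[q - (p+1)]'(by simp; omega) = xs[q] := by
      rw [List.getElem_drop]
      congr 1
      omega
    exact h2 ▸ List.getElem_mem _
  rw [List.all_eq_false]
  refine ⟨xs[q], hmem, ?_⟩
  have hst : pvStop xs[q] = true := by
    simp only [pvStop]
    apply decide_eq_true
    left
    rw [← List.getD_eq_getElem xs [] hqlen]
    exact hqty
  simp [hst]
theorem pv_group_concat_of_mem {xs : List pvCU} {p : Nat} (hp : p ∈ pvParaPos xs) (x : pvCU) :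
    pvGroup (xs ++ [x]) p = pvHeads (xs.take p) ++ [xs.getD p []] ++ pvTrail (xs.drop (p+1) ++ [x]) := by
  obtain ⟨hlen, -⟩ := pv_mem_paraPos.mp hp
  unfold pvGroup
  rw [List.take_append_of_le_length (by omega), List.getD_append _ _ _ _ hlen,
    List.drop_append_of_le_length (by omega)]

theorem pv_group_stop {xs : List pvCU} {p : Nat} {x : pvCU}
    (hp : p ∈ pvParaPos xs) (hx : pvStop x = true) :
    pvGroup (xs ++ [x]) p = pvGroup xs p := by
  rw [pv_group_concat_of_mem hp, pv_trail_concat_stop _ _ hx]; rfl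

theorem pv_group_notall {xs : List pvCU} {p : Nat} {x : pvCU}
    (hp : p ∈ pvParaPos xs) (h : (xs.drop (p+1)).all (fun cu => !pvStop cu) = false) :
    pvGroup (xs ++ [x]) p = pvGroup xs p := by
  rw [pv_group_concat_of_mem hp, pv_trail_concat_notall _ _ h]; rfl

theorem pv_open_false_all {xs : List pvCU} (ho : pvOpen xs = false) :
    ∀ p ∈ pvParaPos xs, (xs.drop (p+1)).all (fun cu => !pvStop cu) = false := by
  intro p hp
  have hne : pvParaPos xs ≠ [] := List.ne_nil_of_mem hp
  obtain ⟨q, hq⟩ := Option.isSome_iff_exists.mp (List.getLast?_isSome.mpr hne)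
  obtain ⟨qs, hqs⟩ := List.getLast?_eq_some_iff.mp hq
  have hqmem : q ∈ pvParaPos xs := by rw [hqs]; simp
  have hple : p ≤ q := by
    have hpw := pv_paraPos_pairwise xs
    rw [hqs] at hpw hp
    rcases List.mem_append.mp hp with h1 | h2
    · exact le_of_lt ((List.pairwise_append.mp hpw).2.2 p h1 q (by simp))
    · simp at h2; omega
  rcases Nat.lt_or_ge p q with hlt | hge
  · exact pv_all_false_of_between hqmem hlt
  · have hpq : p = q := by omega
    unfold pvOpen at ho
    rw [hq] at ho
    simpa [hpq] using ho
theorem pv_foldB_inv (xs : List pvCU) :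
    xs.foldl pvStepB ([], false, []) =
      ((pvParaPos xs).map (pvGroup xs), pvOpen xs, pvHeads xs) := by
  induction xs using List.reverseRecOn with
  | nil => rfl
  | append_singleton xs x ih =>
    rw [List.foldl_append, ih, List.foldl_cons, List.foldl_nil]
    have hTB : pvTyB x = pvTyA x := rfl
    unfold pvStepB
    rw [hTB]
    simp only []
    by_cases hp : pvTyA x = "paragraph"
    · rw [if_pos hp]
      have hstop : pvStop x = true := by simp [pvStop, hp]
      have hrun : pvRun x = false := by simp [pvRun, hp]
      refine Prod.ext ?_ (Prod.ext ?_ ?_)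
      · -- groups
        show (pvParaPos xs).map (pvGroup xs) ++ [pvHeads xs ++ [x]]
            = (pvParaPos (xs ++ [x])).map (pvGroup (xs ++ [x]))
        rw [pv_paraPos_concat, if_pos hp, List.map_append]
        congr 1
        · exact (List.map_congr_left (fun p hp' => (pv_group_stop hp' hstop).symm))
        · rw [List.map_singleton]
          unfold pvGroup
          rw [List.take_left, List.drop_of_length_le (by simp)]
          have hgd : (xs ++ [x]).getD xs.length [] = x := by
            simp [List.getD]
          rw [hgd]
          show [pvHeads xs ++ [x]] = [pvHeads xs ++ [x] ++ pvTrail []]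
          simp [pvTrail]
      · -- open flag
        show true = pvOpen (xs ++ [x])
        unfold pvOpen
        rw [pv_paraPos_concat, if_pos hp, List.getLast?_concat]
        show true = (List.drop (xs.length + 1) (xs ++ [x])).all fun cu => !pvStop cu
        rw [List.drop_of_length_le (by simp)]
        rfl
      · -- buffer
        show [] = pvHeads (xs ++ [x])
        rw [pv_heads_concat, hrun]
        simp
    · rw [if_neg hp]
      by_cases hh : pvTyA x = "heading"
      · rw [if_pos hh]
        have hstop : pvStop x = true := by simp [pvStop, hh]
        have hrun : pvRun x = true := by simp [pvRun, hh]
        have hhd : pvHead x = true := by simp [pvHead, hh]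
        have hpp : pvParaPos (xs ++ [x]) = pvParaPos xs := by
          rw [pv_paraPos_concat, if_neg hp]; simp
        refine Prod.ext ?_ (Prod.ext ?_ ?_)
        · show (pvParaPos xs).map (pvGroup xs) = (pvParaPos (xs ++ [x])).map (pvGroup (xs ++ [x]))
          rw [hpp]
          exact (List.map_congr_left (fun p hp' => (pv_group_stop hp' hstop).symm))
        · show false = pvOpen (xs ++ [x])
          unfold pvOpen
          rw [hpp]
          cases hlast : (pvParaPos xs).getLast? with
          | none => rfl
          | some q =>
            obtain ⟨qs, hqs⟩ := List.getLast?_eq_some_iff.mp hlast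
            have hqmem : q ∈ pvParaPos xs := by rw [hqs]; simp
            obtain ⟨hqlen, -⟩ := pv_mem_paraPos.mp hqmem
            show false = ((xs ++ [x]).drop (q+1)).all fun cu => !pvStop cu
            rw [List.drop_append_of_le_length (by omega), List.all_append]
            simp [hstop]
        · show pvHeads xs ++ [x] = pvHeads (xs ++ [x])
          rw [pv_heads_concat, hrun, hhd]
          simp
      · rw [if_neg hh]
        have hstop : pvStop x = false := by simp [pvStop, hp, hh]
        have hpp : pvParaPos (xs ++ [x]) = pvParaPos xs := by
          rw [pv_paraPos_concat, if_neg hp]; simp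
        have hopen_eq : pvOpen (xs ++ [x]) = pvOpen xs := by
          unfold pvOpen
          rw [hpp]
          cases hlast : (pvParaPos xs).getLast? with
          | none => rfl
          | some q =>
            obtain ⟨qs, hqs⟩ := List.getLast?_eq_some_iff.mp hlast
            have hqmem : q ∈ pvParaPos xs := by rw [hqs]; simp
            obtain ⟨hqlen, -⟩ := pv_mem_paraPos.mp hqmem
            show ((xs ++ [x]).drop (q+1)).all (fun cu => !pvStop cu)
                = (xs.drop (q+1)).all fun cu => !pvStop cu
            rw [List.drop_append_of_le_length (by omega), List.all_append]
            simp [hstop]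
        refine Prod.ext ?_ (Prod.ext ?_ ?_)
        · -- groups component
          show (if pvOpen xs = true ∧ pvTyA x ≠ "spacer" then
                  ((pvParaPos xs).map (pvGroup xs)).dropLast
                    ++ [((pvParaPos xs).map (pvGroup xs)).getLastD [] ++ [x]]
                else (pvParaPos xs).map (pvGroup xs))
              = (pvParaPos (xs ++ [x])).map (pvGroup (xs ++ [x]))
          rw [hpp]
          by_cases hop : pvOpen xs = true
          · have hlast : ∃ q, (pvParaPos xs).getLast? = some q := by
              unfold pvOpen at hop
              cases hl : (pvParaPos xs).getLast? with
              | none => rw [hl] at hop; exact absurd hop (by simp)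
              | some q => exact ⟨q, rfl⟩
            obtain ⟨q, hq⟩ := hlast
            obtain ⟨qs, hqs⟩ := List.getLast?_eq_some_iff.mp hq
            have hqmem : q ∈ pvParaPos xs := by rw [hqs]; simp
            have hall : (xs.drop (q+1)).all (fun cu => !pvStop cu) = true := by
              unfold pvOpen at hop
              rw [hq] at hop
              exact hop
            have hqsmem : ∀ p ∈ qs, pvGroup (xs ++ [x]) p = pvGroup xs p := by
              intro p hpmem
              have hplt : p < q := by
                have hpw := pv_paraPos_pairwise xs
                rw [hqs] at hpw
                exact (List.pairwise_append.mp hpw).2.2 p hpmem q (by simp)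
              exact pv_group_notall (by rw [hqs]; exact List.mem_append_left _ hpmem)
                (pv_all_false_of_between hqmem hplt)
            by_cases hsp : pvTyA x ≠ "spacer"
            · rw [if_pos ⟨hop, hsp⟩, hqs, List.map_append, List.map_singleton,
                List.dropLast_concat, List.getLastD_concat, List.map_append, List.map_singleton]
              congr 1
              · exact (List.map_congr_left (fun p hpmem => (hqsmem p hpmem).symm))
              · rw [pv_group_concat_of_mem hqmem, pv_trail_concat_nonstop _ _ hstop hall,
                  if_pos (by simp [pvNsp, hsp])]
                unfold pvGroup
                simp
            · rw [if_neg (by tauto)]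
              rw [hqs, List.map_append, List.map_append, List.map_singleton, List.map_singleton]
              congr 1
              · exact (List.map_congr_left (fun p hpmem => (hqsmem p hpmem).symm))
              · rw [pv_group_concat_of_mem hqmem, pv_trail_concat_nonstop _ _ hstop hall,
                  if_neg (by simp [pvNsp]; tauto)]
                unfold pvGroup
                simp
          · rw [if_neg (by tauto)]
            exact (List.map_congr_left (fun p hpmem =>
              (pv_group_notall hpmem (pv_open_false_all (by simpa using hop) p hpmem)).symm))
        · show pvOpen xs = pvOpen (xs ++ [x])
          exact hopen_eq.symm
        · -- buffer component
          show (if pvTyA x = "image" ∨ pvTyA x = "caption" ∨ pvTyA x = "spacer"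
                then pvHeads xs else []) = pvHeads (xs ++ [x])
          rw [pv_heads_concat]
          by_cases hics : pvTyA x = "image" ∨ pvTyA x = "caption" ∨ pvTyA x = "spacer"
          · rw [if_pos hics, if_pos (by simp [pvRun]; tauto), if_neg (by simp [pvHead, hh])]
            simp
          · rw [if_neg hics, if_neg (by simp [pvRun]; tauto)]
theorem pv_range2 (a : Int) : PySem.List.pyRange a (a+2) 1 = [a, a+1] := by
  rw [PySem.List.pyRange_one_cons (by omega), show a + 2 = (a+1) + 1 by ring,
    PySem.List.pyRange_one_singleton]

theorem pv_range3 (a : Int) : PySem.List.pyRange a (a+3) 1 = [a, a+1, a+2] := by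
  rw [PySem.List.pyRange_one_cons (by omega), show a + 3 = (a+1) + 2 by ring, pv_range2]
  simp only [List.cons.injEq, and_true, true_and]
  omega

theorem pv_window_eq (P n : Int) (h0 : 0 ≤ P) (hn : P < n) :
    [(-1:Int), 0, 1].foldl (fun acc off =>
        if 0 ≤ P + off ∧ P + off < n then acc ++ [P + off] else acc) []
      = PySem.List.pyRange (max (P-1) 0) (min (P+1) (n-1) + 1) 1 := by
  simp only [List.foldl_cons, List.foldl_nil]
  rw [if_pos (show 0 ≤ P + 0 ∧ P + 0 < n by constructor <;> omega)]
  by_cases h1 : (1:Int) ≤ P <;> by_cases h2 : P + 1 < n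
  · rw [if_pos (show 0 ≤ P + -1 ∧ P + -1 < n by constructor <;> omega),
      if_pos (show 0 ≤ P + 1 ∧ P + 1 < n by constructor <;> omega),
      max_eq_left (by omega), min_eq_left (by omega),
      show P + 1 + 1 = (P - 1) + 3 by ring, pv_range3]
    simp only [List.nil_append, List.append_assoc, List.singleton_append,
      List.cons_append, List.cons.injEq, and_true, true_and]
    omega
  · rw [if_pos (show 0 ≤ P + -1 ∧ P + -1 < n by constructor <;> omega),
      if_neg (show ¬ (0 ≤ P + 1 ∧ P + 1 < n) by omega),
      max_eq_left (by omega), min_eq_right (by omega),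
      show n - 1 + 1 = (P - 1) + 2 by omega, pv_range2]
    simp only [List.nil_append, List.singleton_append, List.cons.injEq, and_true]
    omega
  · rw [if_neg (show ¬ (0 ≤ P + -1 ∧ P + -1 < n) by omega),
      if_pos (show 0 ≤ P + 1 ∧ P + 1 < n by constructor <;> omega),
      max_eq_right (by omega), min_eq_left (by omega),
      show P + 1 + 1 = (0:Int) + 2 by omega, pv_range2]
    simp only [List.nil_append, List.singleton_append, List.cons.injEq, and_true]
    omega
  · rw [if_neg (show ¬ (0 ≤ P + -1 ∧ P + -1 < n) by omega),
      if_neg (show ¬ (0 ≤ P + 1 ∧ P + 1 < n) by omega),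
      max_eq_right (by omega), min_eq_right (by omega),
      show n - 1 + 1 = (0:Int) + 1 by omega, PySem.List.pyRange_one_singleton]
    simp only [List.nil_append, List.cons.injEq, and_true]
    omega

theorem pv_stepA_eq (cus : List pvCU) (j : Int) (hj0 : 0 ≤ j)
    (hjn : j < ((pvParaPos cus).length : Int)) (du : List pvCU) :
    pvFwdA cus ((PySem.List.pyGetD ((pvParaPos cus).map (fun n : Nat => (n:Int))) j 0) + 1)
      ((du ++ pvBackA cus ((PySem.List.pyGetD ((pvParaPos cus).map (fun n : Nat => (n:Int))) j 0) - 1) [])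
        ++ [PySem.List.pyGetD cus (PySem.List.pyGetD ((pvParaPos cus).map (fun n : Nat => (n:Int))) j 0) []])
    = du ++ pvGroup cus ((pvParaPos cus).getD j.toNat 0) := by
  have hk : j.toNat < (pvParaPos cus).length := by omega
  have hpos : PySem.List.pyGetD ((pvParaPos cus).map (fun n : Nat => (n:Int))) j 0
      = (((pvParaPos cus).getD j.toNat 0 : Nat) : Int) := by
    rw [PySem.List.pyGetD_of_nonneg _ _ hj0,
      List.getD_eq_getElem _ _ (by simpa using hk), List.getElem_map,
      List.getD_eq_getElem _ _ hk]
  set p : Nat := (pvParaPos cus).getD j.toNat 0 with hpdef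
  have hpmem : p ∈ pvParaPos cus := by
    rw [hpdef, List.getD_eq_getElem _ _ hk]
    exact List.getElem_mem _
  obtain ⟨hplen, -⟩ := pv_mem_paraPos.mp hpmem
  rw [hpos, PySem.List.pyGetD_natCast, pv_backA_eq cus p (by omega),
    show ((p:Int) + 1) = ((p + 1 : Nat) : Int) by push_cast; ring,
    pv_fwdA_eq cus (p+1)]
  unfold pvGroup
  simp

theorem pv_stepB_eq (cus : List pvCU) (j : Int) (hj0 : 0 ≤ j)
    (hjn : j < ((pvParaPos cus).length : Int)) (du : List pvCU) :
    du ++ PySem.List.pyGetD ((pvParaPos cus).map (pvGroup cus)) j []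
    = du ++ pvGroup cus ((pvParaPos cus).getD j.toNat 0) := by
  have hk : j.toNat < (pvParaPos cus).length := by omega
  rw [PySem.List.pyGetD_of_nonneg _ _ hj0,
    List.getD_eq_getElem _ _ (by simpa using hk), List.getElem_map,
    List.getD_eq_getElem _ _ hk]

theorem pv_fold_eq (cus : List pvCU) (idxs : List Int)
    (h : ∀ j ∈ idxs, 0 ≤ j ∧ j < ((pvParaPos cus).length : Int)) :
    ∀ du : List pvCU,
      idxs.foldl (fun du pa =>
        pvFwdA cus ((PySem.List.pyGetD ((pvParaPos cus).map (fun n : Nat => (n:Int))) pa 0) + 1)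
          ((du ++ pvBackA cus ((PySem.List.pyGetD ((pvParaPos cus).map (fun n : Nat => (n:Int))) pa 0) - 1) [])
            ++ [PySem.List.pyGetD cus (PySem.List.pyGetD ((pvParaPos cus).map (fun n : Nat => (n:Int))) pa 0) []])) du
      = idxs.foldl (fun out j => out ++ PySem.List.pyGetD ((pvParaPos cus).map (pvGroup cus)) j []) du := by
  induction idxs with
  | nil => intro du; rfl
  | cons j idxs ih =>
    intro du
    obtain ⟨hj0, hjn⟩ := h j (by simp)
    rw [List.foldl_cons, List.foldl_cons, pv_stepA_eq cus j hj0 hjn du,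
      ← pv_stepB_eq cus j hj0 hjn du]
    exact ih (fun i hi => h i (by simp [hi])) _
theorem pv_main (paragraph_index : Int) (content_units : List (List (String × String))) :
    get_display_content paragraph_index content_units
      = get_display_content_alt paragraph_index content_units := by
  simp only [get_display_content, get_display_content_alt]
  rw [pv_paraIdxA_eq, pv_foldB_inv]
  dsimp only
  simp only [List.length_map]
  by_cases h0 : (((pvParaPos content_units).length : Int)) = 0
  · rw [if_pos h0, if_pos h0]
  · rw [if_neg h0, if_neg h0]
    set n : Int := ((pvParaPos content_units).length : Int) with hn
    set P : Int := (if paragraph_index < 0 then (0:Int)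
      else if paragraph_index ≥ n then n - 1 else paragraph_index) with hP
    have hP0 : 0 ≤ P := by rw [hP]; split_ifs <;> omega
    have hPn : P < n := by rw [hP]; split_ifs <;> omega
    have hwin := pv_window_eq P n hP0 hPn
    rw [hwin]
    congr 1
    exact pv_fold_eq content_units _ (fun j hj => by
      rw [PySem.List.mem_pyRange_one] at hj
      obtain ⟨hj1, hj2⟩ := hj
      refine ⟨le_trans (le_max_right _ _) hj1, ?_⟩
      have hmin := min_le_right (P+1) (n-1)
      omega) []

-- ===== VERDICT (by name: the statement is the Claim_ definition above) =====
theorem get_display_content_spec : Claim_equal_get_display_content := by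
  intro paragraph_index content_units _ _
  show get_display_content paragraph_index content_units
      = get_display_content_alt paragraph_index content_units
  exact pv_main paragraph_index content_units
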